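-- pv_equiv track=rewrite | github.com/Nazarshia2889/USACO | USACO (2020-2021)/acow.py | hlist
-- ===== SOURCE A (Python) =====
-- def hlist(cs):
--   indices = []
--   for i in range(len(cs)):
--     curr = cs[i]
--     result = filter(lambda x: x >= curr, cs)
--     newRes = list(result)
--     if cs[i] <= len(newRes):
--         indices.append(curr)
--   x = sorted(indices, reverse = True)
--   y = []
--   for i in x:
--     if i not in y:
--         y.append(i)
--   return y
-- ===== SOURCE B (Python) =====
-- def hlist(cs):
--     # sort once descending; in that order the elements >= v are exactly the first j
--     # where j is the position just past the last occurrence of v, so one linear scan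
--     # over the sorted list replaces A's quadratic per-element filter, and emitting
--     # each value only at the end of its equal run replaces the dedup pass.
--     s = sorted(cs, reverse=True)
--     n = len(s)
--     out = []
--     j = 0
--     while j < n:
--         v = s[j]
--         j += 1
--         if (j == n or s[j] != v) and v <= j:
--             out.append(v)
--     return out
-- ===== Notes on version B (the rewrite author's own statement) =====
-- stated objective: faster
-- what changed: B sorts once descending and makes a single scan in which the 1-based position past each equal run is exactly the count of elements >= that value, emitting each distinct value once, instead of A's per-element filter pass plus a separate sort-and-dedup pass.
import Mathlib
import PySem

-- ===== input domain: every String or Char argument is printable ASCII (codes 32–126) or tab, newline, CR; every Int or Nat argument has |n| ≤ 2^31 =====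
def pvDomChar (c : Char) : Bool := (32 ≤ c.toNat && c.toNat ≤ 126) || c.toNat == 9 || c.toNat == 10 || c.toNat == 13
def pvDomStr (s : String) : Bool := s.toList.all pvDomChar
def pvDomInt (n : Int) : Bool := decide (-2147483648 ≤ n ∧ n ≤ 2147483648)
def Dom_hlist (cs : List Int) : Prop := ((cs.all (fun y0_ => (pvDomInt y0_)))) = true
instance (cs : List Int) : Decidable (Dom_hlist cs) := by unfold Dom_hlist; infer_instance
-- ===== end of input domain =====

-- B sorts once descending and finds each value's count of greater-or-equal elements as its
-- run-end position in that order (one scan), instead of A's per-element filter plus a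
-- separate sort-and-dedup pass.

-- ===== PORT A =====
def hlist (cs : List Int) : List Int :=
  let indices := (PySem.List.pyRange 0 (cs.length : Int) 1).foldl (fun acc i =>
      let curr := PySem.List.pyGetD cs i 0
      let newRes := cs.filter (fun x => decide (x ≥ curr))
      if curr ≤ (newRes.length : Int) then acc ++ [curr] else acc) []
  let x := PySem.List.sorted indices (fun v => v) true
  x.foldl (fun y i => if i ∈ y then y else y ++ [i]) []

-- ===== PORT B =====
-- the while loop over the descending-sorted list, carrying j (elements consumed so far);
-- `rest.head? ≠ some v` is Python's `j == n or s[j] != v`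
def hlistAltGo : List Int → Int → List Int
  | [], _ => []
  | v :: rest, j =>
      if rest.head? ≠ some v ∧ v ≤ j + 1 then v :: hlistAltGo rest (j + 1)
      else hlistAltGo rest (j + 1)

def hlist_alt (cs : List Int) : List Int :=
  hlistAltGo (PySem.List.sorted cs (fun v => v) true) 0

-- ===== PRECONDITION & SPEC =====
def Spec_hlist (cs : List Int) (out : List Int) : Prop := out = hlist_alt cs
instance (cs : List Int) (out : List Int) : Decidable (Spec_hlist cs out) := by unfold Spec_hlist; infer_instance

-- ===== CLAIM (what is proved, stated in full; the proofs are below) =====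
def Claim_equal_hlist : Prop := ∀ (cs : List Int), Dom_hlist cs → Spec_hlist cs (hlist cs)

-- ===== LEMMAS AND PROOFS =====

-- adjacent dedup with the last emitted value carried as an option
def ddFrom : Option Int → List Int → List Int
  | _, [] => []
  | o, v :: t => if o = some v then ddFrom o t else v :: ddFrom (some v) t

-- number of elements of L that are ≥ v, as an Int
def cntGe (L : List Int) (v : Int) : Int := ((L.filter (fun x => decide (v ≤ x))).length : Int)

theorem cntGe_perm {L M : List Int} (h : L.Perm M) (v : Int) : cntGe L v = cntGe M v := by
  unfold cntGe
  rw [(h.filter _).length_eq]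

theorem cntGe_cons_of_le {v w : Int} (rest : List Int) (h : w ≤ v) :
    cntGe (v :: rest) w = 1 + cntGe rest w := by
  unfold cntGe
  simp [h]
  omega

theorem cntGe_eq_zero {v : Int} {rest : List Int} (h : ∀ w ∈ rest, w < v) :
    cntGe rest v = 0 := by
  unfold cntGe
  rw [List.filter_eq_nil_iff.mpr]
  · rfl
  · intro w hw
    simpa using not_le.mpr (h w hw)

theorem ddFrom_some_not_head {v : Int} {M : List Int} (h : M.head? ≠ some v) :
    ddFrom (some v) M = ddFrom none M := by
  cases M with
  | nil => rfl
  | cons w t =>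
      have hv : v ≠ w := by intro he; exact h (by simp [he])
      simp [ddFrom, hv]

-- A's dedup foldl on a weakly-descending list is adjacent dedup
theorem dedup_foldl_eq_ddFrom (X : List Int) :
    ∀ y : List Int, X.Pairwise (fun a b => b ≤ a) →
      (∀ w ∈ X, w ∈ y → y.getLast? = some w) →
      (∀ b ∈ y, ∀ a ∈ X, a ≤ b) →
      X.foldl (fun y i => if i ∈ y then y else y ++ [i]) y = y ++ ddFrom y.getLast? X := by
  induction X with
  | nil => intro y _ _ _; simp [ddFrom]
  | cons v t ih =>
      intro y hp h1 h2
      have hpt : t.Pairwise (fun a b => b ≤ a) := hp.of_cons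
      by_cases hv : v ∈ y
      · have hl : y.getLast? = some v := h1 v (by simp) hv
        rw [List.foldl_cons]
        simp only [hv, if_true]
        rw [ih y hpt (fun w hw => h1 w (by simp [hw])) (fun b hb a ha => h2 b hb a (by simp [ha]))]
        rw [hl]
        simp [ddFrom]
      · have hl : y.getLast? ≠ some v := by
          intro he
          exact hv (List.mem_of_getLast? he)
        rw [List.foldl_cons]
        simp only [hv, if_false]
        have hlast : (y ++ [v]).getLast? = some v := by simp
        rw [ih (y ++ [v]) hpt ?_ ?_]
        · rw [hlast]
          cases hy : y.getLast? with
          | none =>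
              have : y = [] := by cases y with | nil => rfl | cons a b => simp at hy
              subst this
              simp [ddFrom]
          | some w =>
              have hwv : w ≠ v := by intro he; exact hl (by rw [hy, he])
              simp [ddFrom, hwv]
        · intro w hw hwy
          rcases List.mem_append.mp hwy with hwy | hwy
          · -- w ∈ y and w ∈ t : then w ≥ v and v ≥ w so w = v
            have hwv : v ≤ w := h2 w hwy v (by simp)
            have hvw : w ≤ v := List.rel_of_pairwise_cons hp hw
            have : w = v := le_antisymm hvw hwv
            rw [this, hlast]
          · simp at hwy
            rw [hwy, hlast]
        · intro b hb a ha
          rcases List.mem_append.mp hb with hb | hb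
          · exact h2 b hb a (by simp [ha])
          · simp at hb
            rw [hb]
            exact List.rel_of_pairwise_cons hp ha

-- the scan over the descending list equals filter-then-adjacent-dedup,
-- with j the number of already-consumed elements (all ≥ every remaining element)
theorem go_eq_ddFrom_filter (L : List Int) :
    L.Pairwise (fun a b => b ≤ a) → ∀ j : Int,
      hlistAltGo L j = ddFrom none (L.filter (fun v => decide (v ≤ j + cntGe L v))) := by
  induction L with
  | nil => intro _ j; simp [hlistAltGo, ddFrom]
  | cons v rest ih =>
      intro hp j
      have hpt := hp.of_cons
      have hle : ∀ w ∈ rest, w ≤ v := fun w hw => List.rel_of_pairwise_cons hp hw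
      -- the predicate on rest's members, re-based
      have hfc : rest.filter (fun w => decide (w ≤ j + cntGe (v :: rest) w))
               = rest.filter (fun w => decide (w ≤ (j + 1) + cntGe rest w)) := by
        apply List.filter_congr
        intro w hw
        have := cntGe_cons_of_le (v := v) rest (hle w hw)
        simp only [decide_eq_decide]
        omega
      have hcv : cntGe (v :: rest) v = 1 + cntGe rest v := cntGe_cons_of_le rest le_rfl
      rw [hlistAltGo]
      by_cases hh : rest.head? = some v
      · -- run continues: v repeats next, both sides merge
        have hrest : ∃ t, rest = v :: t := by
          cases rest with
          | nil => simp at hh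
          | cons w t => exact ⟨t, by simpa using (by simpa using hh : w = v) ▸ rfl⟩
        simp only [hh, ne_eq, not_true_eq_false, false_and, if_false]
        rw [ih hpt (j + 1), ← hfc]
        rw [List.filter_cons]
        by_cases hpv : v ≤ j + cntGe (v :: rest) v
        · simp only [hpv, decide_true, if_true]
          obtain ⟨t, ht⟩ := hrest
          subst ht
          have hpv' : (v ≤ j + cntGe (v :: v :: t) v) := hpv
          rw [List.filter_cons]
          simp only [hpv', decide_true, if_true]
          simp [ddFrom]
        · simp [hpv]
      · -- run ends at v : everything in rest is < v, so cntGe rest v = 0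
        have hlt : ∀ w ∈ rest, w < v := by
          intro w hw
          cases rest with
          | nil => simp at hw
          | cons w0 t =>
              have hw0 : w0 < v := lt_of_le_of_ne (hle w0 (by simp)) (by
                intro he; exact hh (by simp [he]))
              rcases List.mem_cons.mp hw with hw' | hw'
              · exact hw' ▸ hw0
              · exact lt_of_le_of_lt (List.rel_of_pairwise_cons hpt hw') hw0
        have hc0 : cntGe rest v = 0 := cntGe_eq_zero hlt
        have hcv1 : cntGe (v :: rest) v = 1 := by rw [hcv, hc0]; norm_num
        rw [ih hpt (j + 1), ← hfc, List.filter_cons]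
        by_cases hpv : v ≤ j + 1
        · have hpv' : v ≤ j + cntGe (v :: rest) v := by rw [hcv1]; omega
          simp only [hpv', decide_true, if_true, hh, ne_eq, not_false_iff, true_and, hpv, if_true]
          rw [ddFrom]
          simp only [reduceCtorEq, if_false]
          congr 1
          refine (ddFrom_some_not_head ?_).symm
          intro hhead
          have hmem : v ∈ rest.filter (fun w => decide (w ≤ j + cntGe (v :: rest) w)) :=
            List.mem_of_mem_head? hhead
          exact absurd (hlt v (List.mem_of_mem_filter hmem)) (lt_irrefl v)
        · have hpv' : ¬ (v ≤ j + cntGe (v :: rest) v) := by rw [hcv1]; omega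
          simp [hpv', hh, hpv]

-- ===== VERDICT (by name: the statement is the Claim_ definition above) =====
theorem hlist_spec : Claim_equal_hlist := by
  intro cs _
  unfold Spec_hlist hlist hlist_alt
  simp only []
  -- A's index loop is a fold over cs itself, i.e. a filter
  have h1 : (PySem.List.pyRange 0 (cs.length : Int) 1).foldl
      (fun acc i =>
        let curr := PySem.List.pyGetD cs i 0
        let newRes := cs.filter (fun x => decide (x ≥ curr))
        if curr ≤ (newRes.length : Int) then acc ++ [curr] else acc) []
      = cs.filter (fun v => decide (v ≤ ((cs.filter (fun x => decide (x ≥ v))).length : Int))) := by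
    rw [PySem.List.foldl_pyRange_zero_pyGetD' cs 0
        (fun acc curr =>
          if curr ≤ ((cs.filter (fun x => decide (x ≥ curr))).length : Int) then acc ++ [curr] else acc) []]
    rw [PySem.List.foldl_append_ite_eq_filter]
    simp
  rw [h1]
  set pA : Int → Bool := fun v => decide (v ≤ ((cs.filter (fun x => decide (x ≥ v))).length : Int)) with hpA
  set s : List Int := PySem.List.sorted cs (fun v => v) true with hs
  have hsp : s.Pairwise (fun a b => b ≤ a) := by
    simpa using PySem.List.sorted_pairwise_rev (xs := cs) (key := fun v => v)
  have hperm : s.Perm cs := PySem.List.sorted_perm cs (fun v => v) true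
  -- sorting commutes with a filter whose test depends only on the value
  have h2 : PySem.List.sorted (cs.filter pA) (fun v => v) true = s.filter pA := by
    have hq1 : (PySem.List.sorted (cs.filter pA) (fun v => v) true).Pairwise
        (fun a b : Int => b ≤ a) := by
      simpa using PySem.List.sorted_pairwise_rev (xs := cs.filter pA) (key := fun v => v)
    have hq2 : (s.filter pA).Pairwise (fun a b : Int => b ≤ a) := hsp.filter pA
    have hpm : (PySem.List.sorted (cs.filter pA) (fun v => v) true).Perm (s.filter pA) :=
      (PySem.List.sorted_perm (cs.filter pA) (fun v => v) true).trans (hperm.filter pA).symm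
    exact List.Perm.eq_of_pairwise (fun a b _ _ h1 h2 => le_antisymm h2 h1) hq1 hq2 hpm
  rw [h2]
  -- A's dedup fold on the (still descending) filtered list is adjacent dedup
  have h3 : (s.filter pA).foldl (fun y i => if i ∈ y then y else y ++ [i]) []
      = ddFrom none (s.filter pA) := by
    have := dedup_foldl_eq_ddFrom (s.filter pA) []
      (hsp.filter pA) (by simp) (by simp)
    simpa using this
  rw [h3]
  -- the filter test, rebased on s (a permutation of cs) with j = 0
  have h4 : s.filter pA = s.filter (fun v => decide (v ≤ (0 : Int) + cntGe s v)) := by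
    apply List.filter_congr
    intro v _
    have hc : cntGe cs v = cntGe s v := cntGe_perm hperm.symm v
    have hfe : cs.filter (fun x => decide (x ≥ v)) = cs.filter (fun x => decide (v ≤ x)) := by
      apply List.filter_congr
      intro x _
      simp [ge_iff_le]
    rw [hpA]
    simp only [hfe]
    have : ((cs.filter (fun x => decide (v ≤ x))).length : Int) = cntGe s v := by
      rw [← hc]; rfl
    rw [this]
    simp only [decide_eq_decide]
    omega
  rw [h4, ← go_eq_ddFrom_filter s hsp 0]
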